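-- pv_equiv track=rewrite | github.com/SophonAlpha/codewars | solutions/nonogram_solver_show.py | transform_col_clues
-- ===== SOURCE A (Python) =====
-- def transform_col_clues(clues):
--     col_clues_rows = max([len(clue) for clue in clues])
--     col_clues = clues[:]
--     col_clues = [(0,) * (col_clues_rows - len(item)) + item
--                  for item in col_clues]
--     col_clues = zip(*[item for item in col_clues])
--     col_clues = [[str(item) if item != 0 else ' '
--                   for item in line] for line in col_clues]
--     col_clues = [' '.join([str(item).rjust(2, ' ') + ' ' for item in line])
--                  for line in col_clues]
--     return col_clues
-- ===== SOURCE B (Python) =====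
-- def transform_col_clues(clues):
--     rows = max([len(clue) for clue in clues])
--     out = []
--     for r in range(rows):
--         cells = []
--         for clue in clues:
--             offset = rows - len(clue)
--             v = clue[r - offset] if r >= offset else 0
--             s = str(v) if v != 0 else ' '
--             cells.append(s.rjust(2, ' ') + ' ')
--         out.append(' '.join(cells))
--     return out
-- ===== Notes on version B (the rewrite author's own statement) =====
-- stated objective: alternative
-- what changed: B replaces A's pad-every-clue-with-leading-zeros plus zip(*) transpose pipeline by a single pass over row indices that selects clue[r-offset] directly (offset = rows - len(clue)), so no padded tuples and no transposed intermediate are ever built.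
import Mathlib
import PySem

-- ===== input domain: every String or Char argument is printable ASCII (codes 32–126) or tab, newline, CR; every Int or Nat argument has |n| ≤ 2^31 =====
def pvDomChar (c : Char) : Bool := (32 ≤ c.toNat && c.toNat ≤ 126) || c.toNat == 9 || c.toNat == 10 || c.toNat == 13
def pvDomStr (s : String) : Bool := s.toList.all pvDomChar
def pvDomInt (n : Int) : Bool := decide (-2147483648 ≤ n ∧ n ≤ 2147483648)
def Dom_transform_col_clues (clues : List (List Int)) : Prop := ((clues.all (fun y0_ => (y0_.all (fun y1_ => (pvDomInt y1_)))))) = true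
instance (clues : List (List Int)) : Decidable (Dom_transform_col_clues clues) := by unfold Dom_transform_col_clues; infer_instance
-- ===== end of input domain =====

-- B builds the output in one pass over row indices, selecting each cell directly
-- from the original clue by an alignment offset, instead of A's pad-then-zip(*)-transpose pipeline.

-- str(item) if item != 0 else ' '  (as a list of chars; shared formatting expression of both Pythons)
def pvCellStr (item : Int) : List Char :=
  if item ≠ 0 then PySem.Int.toChars item else [' ']

-- s.rjust(2, ' ') + ' '
def pvRjust2Sp (s : List Char) : List Char :=
  List.replicate (2 - s.length) ' ' ++ s ++ [' ']

-- ===== PORT A =====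
-- zip(*ls): Python zip semantics — stop at the shortest argument
def pvZipStar (ls : List (List Int)) : List (List Int) :=
  if _h : ls = [] ∨ ls.any (·.isEmpty) then []
  else (ls.map (·.headI)) :: pvZipStar (ls.map (·.tail))
termination_by ls.headI.length
decreasing_by
  simp only [not_or, List.any_eq_true, not_exists, not_and] at _h
  obtain ⟨hne, hall⟩ := _h
  cases ls with
  | nil => exact absurd rfl hne
  | cons x xs =>
    have hx : ¬ x.isEmpty := hall x (by simp)
    cases x with
    | nil => simp at hx
    | cons a t => simp [List.headI]

def transform_col_clues (clues : List (List Int)) : List String :=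
  match PySem.List.max? (clues.map (fun clue => (clue.length : Int))) (fun x => x) with
  | none => []   -- unreachable under Pre_ (Python raises ValueError on max([]))
  | some rows =>
    let padded := clues.map (fun item => List.replicate (rows - (item.length : Int)).toNat 0 ++ item)
    let lines := pvZipStar padded
    let lines := lines.map (fun line => line.map pvCellStr)
    lines.map (fun line => String.ofList (PySem.Chars.join [' '] (line.map pvRjust2Sp)))

-- ===== PORT B =====
def transform_col_clues_alt (clues : List (List Int)) : List String :=
  match PySem.List.max? (clues.map (fun clue => (clue.length : Int))) (fun x => x) with
  | none => []   -- unreachable under Pre_ (Python raises ValueError on max([]))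
  | some rows =>
    (PySem.List.pyRange 0 rows 1).map (fun r =>
      String.ofList (PySem.Chars.join [' '] (clues.map (fun clue =>
        let offset := rows - (clue.length : Int)
        let v := if r ≥ offset then (PySem.List.pyGet? clue (r - offset)).getD 0 else 0
        pvRjust2Sp (pvCellStr v)))))

-- ===== PRECONDITION & SPEC =====
-- Pre_ excludes only clues = [], where both Pythons raise ValueError (max of an empty list).
def Pre_transform_col_clues (clues : List (List Int)) : Prop := clues ≠ []
instance (clues : List (List Int)) : Decidable (Pre_transform_col_clues clues) := by
  unfold Pre_transform_col_clues; infer_instance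

def pvWitness_transform_col_clues : List (List Int) := [[1], [0, 23], [-4, 0, 5]]

def Spec_transform_col_clues (clues : List (List Int)) (out : List String) : Prop := out = transform_col_clues_alt clues
instance (clues : List (List Int)) (out : List String) : Decidable (Spec_transform_col_clues clues out) := by unfold Spec_transform_col_clues; infer_instance

-- ===== CLAIM (what is proved, stated in full; the proofs are below) =====
def Claim_equal_transform_col_clues : Prop := ∀ (clues : List (List Int)), Dom_transform_col_clues clues → Pre_transform_col_clues clues → Spec_transform_col_clues clues (transform_col_clues clues)

-- ===== LEMMAS AND PROOFS =====

-- zip(*) of a nonempty family of equal-length lists, characterised by positions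
theorem pvZipStar_eq (n : Nat) (ls : List (List Int)) (hne : ls ≠ [])
    (hlen : ∀ l ∈ ls, l.length = n) :
    pvZipStar ls = (List.range n).map (fun r => ls.map (fun l => l.getD r 0)) := by
  induction n generalizing ls with
  | zero =>
    rw [pvZipStar.eq_def]
    have : ls.any (·.isEmpty) := by
      cases ls with
      | nil => exact absurd rfl hne
      | cons x xs =>
        simp only [List.any_cons, Bool.or_eq_true]
        left
        simpa [List.isEmpty_iff, List.length_eq_zero_iff] using hlen x (by simp)
    simp [this]
  | succ n ih =>
    have hnoemp : ¬ ls.any (·.isEmpty) := by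
      simp only [List.any_eq_true, not_exists, not_and]
      intro l hl
      have := hlen l hl
      simp [List.isEmpty_iff]
      intro h; rw [h] at this; simp at this
    rw [pvZipStar.eq_def, dif_neg (not_or.mpr ⟨hne, hnoemp⟩)]
    have htails : ∀ l ∈ ls.map (·.tail), l.length = n := by
      intro l hl
      simp only [List.mem_map] at hl
      obtain ⟨l', hl', rfl⟩ := hl
      have := hlen l' hl'
      simp [List.length_tail, this]
    have htne : ls.map (·.tail) ≠ [] := by
      cases ls with
      | nil => exact absurd rfl hne
      | cons x xs => simp
    rw [ih (ls.map (·.tail)) htne htails]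
    rw [List.range_succ_eq_map]
    simp only [List.map_cons, List.map_map]
    congr 1
    · apply List.map_congr_left
      intro l hl
      have hln := hlen l hl
      cases l with
      | nil => simp at hln
      | cons a t => simp [List.headI]
    · apply List.map_congr_left
      intro r _
      simp only [Function.comp]
      apply List.map_congr_left
      intro l hl
      have hln := hlen l hl
      cases l with
      | nil => simp at hln
      | cons a t => simp

-- getD on a zero-padded clue, in terms of the original clue
theorem pvPad_getD (rows : Int) (c : List Int) (r : Nat) (hc : (c.length : Int) ≤ rows) :
    (List.replicate (rows - (c.length : Int)).toNat 0 ++ c).getD r 0 =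
      if (r : Int) ≥ rows - (c.length : Int) then
        (PySem.List.pyGet? c ((r : Int) - (rows - (c.length : Int)))).getD 0
      else 0 := by
  set k := (rows - (c.length : Int)).toNat with hk
  have hkeq : (k : Int) = rows - (c.length : Int) := by omega
  by_cases hr : (r : Int) ≥ rows - (c.length : Int)
  · rw [if_pos hr]
    have hkr : k ≤ r := by omega
    rw [List.getD_eq_getElem?_getD, List.getElem?_append_right (by simpa using hkr)]
    have : (r : Int) - (rows - (c.length : Int)) = ((r - k : Nat) : Int) := by
      omega
    rw [this, PySem.List.pyGet?_natCast]
    simp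
  · rw [if_neg hr]
    have hrk : r < k := by omega
    rw [List.getD_eq_getElem?_getD, List.getElem?_append_left (by simpa using hrk)]
    simp [hrk]

theorem transform_col_clues_eq_alt (clues : List (List Int)) (hne : clues ≠ []) :
    transform_col_clues clues = transform_col_clues_alt clues := by
  unfold transform_col_clues transform_col_clues_alt
  cases hmax : PySem.List.max? (clues.map (fun clue => (clue.length : Int))) (fun x => x) with
  | none => rfl
  | some rows =>
    simp only []
    have hmem : rows ∈ clues.map (fun clue => (clue.length : Int)) := PySem.List.max?_mem hmax
    have hub : ∀ y ∈ clues.map (fun clue => (clue.length : Int)), y ≤ rows :=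
      PySem.List.max?_isMax hmax
    have hrows0 : 0 ≤ rows := by
      simp only [List.mem_map] at hmem
      obtain ⟨c, _, rfl⟩ := hmem
      positivity
    have hlb : ∀ c ∈ clues, (c.length : Int) ≤ rows := by
      intro c hc
      exact hub _ (List.mem_map_of_mem hc)
    -- padded lists all have length rows.toNat
    have hplen : ∀ l ∈ clues.map (fun item => List.replicate (rows - (item.length : Int)).toNat 0 ++ item),
        l.length = rows.toNat := by
      intro l hl
      simp only [List.mem_map] at hl
      obtain ⟨c, hc, rfl⟩ := hl
      have := hlb c hc
      simp only [List.length_append, List.length_replicate]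
      omega
    have hpne : clues.map (fun item => List.replicate (rows - (item.length : Int)).toNat 0 ++ item) ≠ [] := by
      cases clues with
      | nil => exact absurd rfl hne
      | cons x xs => simp
    rw [pvZipStar_eq rows.toNat _ hpne hplen]
    rw [PySem.List.pyRange_one]
    simp only [List.map_map, sub_zero, zero_add]
    apply List.map_congr_left
    intro r hr
    have hrlt : r < rows.toNat := List.mem_range.mp hr
    simp only [Function.comp]
    congr 1
    congr 1
    simp only [List.map_map]
    apply List.map_congr_left
    intro c hc
    simp only [Function.comp]
    congr 1
    rw [pvPad_getD rows c r (hlb c hc)]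

-- ===== VERDICT (by name: the statement is the Claim_ definition above) =====
theorem transform_col_clues_spec : Claim_equal_transform_col_clues := by
  intro clues _ hpre
  unfold Spec_transform_col_clues
  exact transform_col_clues_eq_alt clues hpre
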